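-- pv_equiv track=rewrite | github.com/daydream2002/shichuanrl | mah_tool/tool2.py | splitColorFlags
-- ===== SOURCE A (Python) =====
-- def f10_to_16(num):  # 用16进制表示
--     a = int(num / 10)
--     b = num - a * 10
--     return a * 16 + b
--
-- def list10_to_16(cardlist):
--     cardlist2 = []
--     for i in cardlist:
--         cardlist2.append(int(f10_to_16(i)))
--     cardlist2.sort()
--     return cardlist2
--
-- def splitColorFlags(cards, fulu):
--     # 输入十进制，转成十六进制
--     handcarAndFulu = []
--     colorFlag = [0, 0, 0]
--
--     handcarAndFulu.extend(cards)
--     for fulu_ in fulu: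
--         handcarAndFulu.extend(fulu_)
--     handcarAndFulu = list10_to_16(handcarAndFulu)
--     for card in handcarAndFulu:
--         if colorFlag[0] == 0 and card & 0xf0 == 0:
--             colorFlag[0] = 1
--         elif colorFlag[1] == 0 and card & 0xf0 == 0x10:
--             colorFlag[1] = 1
--         elif colorFlag[2] == 0 and card & 0xf0 == 0x20:
--             colorFlag[2] = 1
--     return colorFlag
-- ===== SOURCE B (Python) =====
-- def f10_to_16(num):  # same tens-digit re-encoding as A (float int() truncation preserved)
--     a = int(num / 10)
--     b = num - a * 10
--     return a * 16 + b
--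
-- def splitColorFlags(cards, fulu):
--     present = {f10_to_16(c) & 0xf0 for c in cards}
--     for meld in fulu:
--         for c in meld:
--             present.add(f10_to_16(c) & 0xf0)
--     return [int(0x00 in present), int(0x10 in present), int(0x20 in present)]
-- ===== Notes on version B (the rewrite author's own statement) =====
-- stated objective: simpler
-- what changed: Replaces the combined-list build, sort and stateful elif flag scan with a single pass collecting the set of suit nibbles and three membership queries; dropping the sort makes it O(n) instead of O(n log n).
import Mathlib
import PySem

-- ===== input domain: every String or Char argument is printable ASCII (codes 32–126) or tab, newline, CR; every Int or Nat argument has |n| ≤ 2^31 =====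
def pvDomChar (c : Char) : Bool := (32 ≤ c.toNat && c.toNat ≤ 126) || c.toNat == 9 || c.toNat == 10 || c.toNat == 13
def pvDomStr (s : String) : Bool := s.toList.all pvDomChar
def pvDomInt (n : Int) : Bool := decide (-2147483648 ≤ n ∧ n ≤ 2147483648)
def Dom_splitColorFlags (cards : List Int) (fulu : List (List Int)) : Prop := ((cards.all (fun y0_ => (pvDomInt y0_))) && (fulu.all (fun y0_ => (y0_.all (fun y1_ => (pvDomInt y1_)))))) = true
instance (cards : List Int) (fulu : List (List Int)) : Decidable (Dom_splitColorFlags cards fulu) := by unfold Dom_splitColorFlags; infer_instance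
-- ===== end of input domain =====

-- B replaces the sort and the stateful elif flag scan with a set of suit nibbles and three membership tests (simpler).

-- ===== PORT A =====
def f10_to_16 (num : Int) : Int :=
  let a := PySem.Int.truncdiv num 10   -- int(num / 10): float truncation, exact for |num| ≤ 2^31
  let b := num - a * 10
  a * 16 + b

def list10_to_16 (cardlist : List Int) : List Int :=
  let cardlist2 := cardlist.foldl (fun acc i => acc ++ [f10_to_16 i]) []
  PySem.List.sorted cardlist2 (fun x => x) false

def splitColorFlags (cards : List Int) (fulu : List (List Int)) : List Int :=
  let handcarAndFulu : List Int := [] ++ cards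
  let handcarAndFulu := fulu.foldl (fun acc fulu_ => acc ++ fulu_) handcarAndFulu
  let handcarAndFulu := list10_to_16 handcarAndFulu
  let colorFlag : Int × Int × Int :=
    handcarAndFulu.foldl (fun cf card =>
      if cf.1 == 0 && PySem.Int.band card 0xf0 == 0 then (1, cf.2.1, cf.2.2)
      else if cf.2.1 == 0 && PySem.Int.band card 0xf0 == 0x10 then (cf.1, 1, cf.2.2)
      else if cf.2.2 == 0 && PySem.Int.band card 0xf0 == 0x20 then (cf.1, cf.2.1, 1)
      else cf) (0, 0, 0)
  [colorFlag.1, colorFlag.2.1, colorFlag.2.2]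

-- ===== PORT B =====
-- B reuses the identical helper f10_to_16 (Source B defines it verbatim the same)
def splitColorFlags_alt (cards : List Int) (fulu : List (List Int)) : List Int :=
  let present : PySem.Set Int := PySem.Set.ofList (cards.map (fun c => PySem.Int.band (f10_to_16 c) 0xf0))
  let present := fulu.foldl (fun s meld =>
      meld.foldl (fun s c => PySem.Set.add s (PySem.Int.band (f10_to_16 c) 0xf0)) s) present
  [if PySem.Set.contains present 0x00 then 1 else 0,
   if PySem.Set.contains present 0x10 then 1 else 0,
   if PySem.Set.contains present 0x20 then 1 else 0]

-- ===== PRECONDITION & SPEC =====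
def Spec_splitColorFlags (cards : List Int) (fulu : List (List Int)) (out : List Int) : Prop := out = splitColorFlags_alt cards fulu
instance (cards : List Int) (fulu : List (List Int)) (out : List Int) : Decidable (Spec_splitColorFlags cards fulu out) := by unfold Spec_splitColorFlags; infer_instance

-- ===== CLAIM (what is proved, stated in full; the proofs are below) =====
def Claim_equal_splitColorFlags : Prop := ∀ (cards : List Int) (fulu : List (List Int)), Dom_splitColorFlags cards fulu → Spec_splitColorFlags cards fulu (splitColorFlags cards fulu)

-- ===== LEMMAS AND PROOFS =====

-- the loop body of A's elif scan, named for the proofs (definitionally the lambda in the port)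
def stepA (cf : Int × Int × Int) (card : Int) : Int × Int × Int :=
  if cf.1 == 0 && PySem.Int.band card 0xf0 == 0 then (1, cf.2.1, cf.2.2)
  else if cf.2.1 == 0 && PySem.Int.band card 0xf0 == 0x10 then (cf.1, 1, cf.2.2)
  else if cf.2.2 == 0 && PySem.Int.band card 0xf0 == 0x20 then (cf.1, cf.2.1, 1)
  else cf

-- A's elif scan over a list l, starting from flags (x, y, z), characterised by membership
lemma loopA_char (l : List Int) (x y z : Int) :
    l.foldl stepA (x, y, z)
    = ((if x = 0 ∧ (∃ c ∈ l, PySem.Int.band c 0xf0 = 0) then 1 else x),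
       (if y = 0 ∧ (∃ c ∈ l, PySem.Int.band c 0xf0 = 0x10) then 1 else y),
       (if z = 0 ∧ (∃ c ∈ l, PySem.Int.band c 0xf0 = 0x20) then 1 else z)) := by
  induction l generalizing x y z with
  | nil => simp
  | cons h t ih =>
    rw [List.foldl_cons]
    by_cases h0 : PySem.Int.band h 0xf0 = 0
    · have h1 : PySem.Int.band h 0xf0 ≠ 0x10 := by omega
      have h2 : PySem.Int.band h 0xf0 ≠ 0x20 := by omega
      by_cases hx : x = 0
      · rw [show stepA (x, y, z) h = (1, y, z) from by simp [stepA, hx, h0], ih]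
        simp [hx, h0, h1, h2]
      · rw [show stepA (x, y, z) h = (x, y, z) from by simp [stepA, hx, h0, h1, h2], ih]
        simp [hx, h0, h1, h2]
    · by_cases h1 : PySem.Int.band h 0xf0 = 0x10
      · have h2 : PySem.Int.band h 0xf0 ≠ 0x20 := by omega
        by_cases hy : y = 0
        · rw [show stepA (x, y, z) h = (x, 1, z) from by simp [stepA, hy, h0, h1], ih]
          simp [hy, h0, h1, h2]
        · rw [show stepA (x, y, z) h = (x, y, z) from by simp [stepA, hy, h0, h1, h2], ih]
          simp [hy, h0, h1, h2]
      · by_cases h2 : PySem.Int.band h 0xf0 = 0x20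
        · by_cases hz : z = 0
          · rw [show stepA (x, y, z) h = (x, y, 1) from by simp [stepA, hz, h0, h1, h2], ih]
            simp [hz, h0, h1, h2]
          · rw [show stepA (x, y, z) h = (x, y, z) from by simp [stepA, hz, h0, h1, h2], ih]
            simp [hz, h0, h1, h2]
        · rw [show stepA (x, y, z) h = (x, y, z) from by simp [stepA, h0, h1, h2], ih]
          simp [h0, h1, h2]

-- membership in B's set built by folding over one meld
lemma foldMeld_mem (m : List Int) (s : PySem.Set Int) (w : Int) :
    (w ∈ m.foldl (fun s c => PySem.Set.add s (PySem.Int.band (f10_to_16 c) 0xf0)) s)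
      ↔ (w ∈ s ∨ ∃ c ∈ m, PySem.Int.band (f10_to_16 c) 0xf0 = w) := by
  induction m generalizing s with
  | nil => simp
  | cons a b ihm =>
    rw [List.foldl_cons, ihm]
    simp [PySem.Set.mem_add]
    aesop

-- membership in B's set after folding over all melds
lemma foldFulu_mem (fulu : List (List Int)) (s : PySem.Set Int) (w : Int) :
    (w ∈ fulu.foldl (fun s meld =>
        meld.foldl (fun s c => PySem.Set.add s (PySem.Int.band (f10_to_16 c) 0xf0)) s) s)
      ↔ (w ∈ s ∨ ∃ c ∈ fulu.flatten, PySem.Int.band (f10_to_16 c) 0xf0 = w) := by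
  induction fulu generalizing s with
  | nil => simp
  | cons m t ih =>
    rw [List.foldl_cons, ih, foldMeld_mem]
    simp only [List.flatten_cons, List.mem_append]
    aesop

-- A's combined, converted, sorted list has a card of nibble v iff some input card has nibble v
lemma handList_any (cards : List Int) (fulu : List (List Int)) (v : Int) :
    (∃ x ∈ list10_to_16 (fulu.foldl (fun acc f => acc ++ f) ([] ++ cards)),
        PySem.Int.band x 0xf0 = v)
      ↔ (∃ c ∈ cards ++ fulu.flatten, PySem.Int.band (f10_to_16 c) 0xf0 = v) := by
  rw [PySem.List.foldl_append_eq_flatten]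
  simp only [list10_to_16, PySem.List.foldl_append_singleton_eq_map, List.nil_append,
    PySem.List.mem_sorted, List.mem_map]
  constructor
  · rintro ⟨x, ⟨c, hc, rfl⟩, hv⟩; exact ⟨c, hc, hv⟩
  · rintro ⟨c, hc, hv⟩; exact ⟨f10_to_16 c, ⟨c, hc, rfl⟩, hv⟩

-- ===== VERDICT (by name: the statement is the Claim_ definition above) =====
theorem splitColorFlags_spec : Claim_equal_splitColorFlags := by
  intro cards fulu _
  unfold Spec_splitColorFlags
  simp only [splitColorFlags, splitColorFlags_alt]
  have hmem : ∀ v : Int,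
      (v ∈ fulu.foldl (fun s meld =>
          meld.foldl (fun s c => PySem.Set.add s (PySem.Int.band (f10_to_16 c) 0xf0)) s)
          (PySem.Set.ofList (cards.map (fun c => PySem.Int.band (f10_to_16 c) 0xf0))))
        ↔ (∃ c ∈ cards ++ fulu.flatten, PySem.Int.band (f10_to_16 c) 0xf0 = v) := by
    intro v
    rw [foldFulu_mem]
    simp only [PySem.Set.mem_ofList, List.mem_map, List.mem_append]
    aesop
  rw [show (fun (cf : Int × Int × Int) card =>
      if cf.1 == 0 && PySem.Int.band card 0xf0 == 0 then ((1 : Int), cf.2.1, cf.2.2)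
      else if cf.2.1 == 0 && PySem.Int.band card 0xf0 == 0x10 then (cf.1, 1, cf.2.2)
      else if cf.2.2 == 0 && PySem.Int.band card 0xf0 == 0x20 then (cf.1, cf.2.1, 1)
      else cf) = stepA from rfl, loopA_char]
  simp only [PySem.Set.contains_eq_listContains, List.contains_iff_mem, hmem, true_and,
    handList_any]
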